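-- pv_equiv track=rewrite | github.com/griffinryan/tamber | worker/src/timbre_worker/services/planner.py | _cycled_slice
-- ===== SOURCE A (Python) =====
-- def _cycled_slice(source: list[str], count: int, offset: int) -> list[str]:
--     if not source or count <= 0:
--         return []
--     length = len(source)
--     result: list[str] = []
--     for index in range(count):
--         result.append(source[(offset + index) % length])
--     return result
-- ===== SOURCE B (Python) =====
-- def _cycled_slice(source: list[str], count: int, offset: int) -> list[str]:
--     if not source or count <= 0:
--         return []
--     length = len(source)
--     start = offset % length
--     return (source * (count // length + 2))[start:start + count]
-- ===== Notes on version B (the rewrite author's own statement) =====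
-- stated objective: idiomatic
-- what changed: Replaces the per-element (offset+index) % length append loop with computing start = offset % length once, replicating the list enough times, and taking one contiguous slice.
import Mathlib
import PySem

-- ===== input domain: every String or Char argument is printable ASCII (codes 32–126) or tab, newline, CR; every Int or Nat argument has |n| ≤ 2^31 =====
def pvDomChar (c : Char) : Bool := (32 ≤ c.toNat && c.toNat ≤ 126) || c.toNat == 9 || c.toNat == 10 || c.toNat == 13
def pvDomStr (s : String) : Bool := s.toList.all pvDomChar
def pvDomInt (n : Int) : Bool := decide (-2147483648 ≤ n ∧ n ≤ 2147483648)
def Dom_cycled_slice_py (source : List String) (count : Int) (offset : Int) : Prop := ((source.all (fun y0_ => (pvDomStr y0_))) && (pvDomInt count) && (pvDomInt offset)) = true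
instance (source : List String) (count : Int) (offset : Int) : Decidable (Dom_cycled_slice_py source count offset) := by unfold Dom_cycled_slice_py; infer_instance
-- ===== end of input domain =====

-- B replaces A's per-element (offset+index) % length loop by one modulo, list replication and a single slice (idiomatic).

-- ===== PORT A =====
def cycled_slice_py (source : List String) (count : Int) (offset : Int) : List String :=
  if source = [] || count ≤ 0 then []
  else
    let length : Int := (source.length : Int)
    (PySem.List.pyRange 0 count 1).foldl
      (fun result index => result ++ [PySem.List.pyGetD source (PySem.Int.mod (offset + index) length) ""]) []

-- ===== PORT B =====
def cycled_slice_py_alt (source : List String) (count : Int) (offset : Int) : List String :=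
  if source = [] || count ≤ 0 then []
  else
    let length : Int := (source.length : Int)
    let start : Int := PySem.Int.mod offset length
    PySem.List.slice ((List.replicate (PySem.Int.floordiv count length + 2).toNat source).flatten)
      (some start) (some (start + count))

-- ===== PRECONDITION & SPEC =====
def Spec_cycled_slice_py (source : List String) (count : Int) (offset : Int) (out : List String) : Prop := out = cycled_slice_py_alt source count offset
instance (source : List String) (count : Int) (offset : Int) (out : List String) : Decidable (Spec_cycled_slice_py source count offset out) := by unfold Spec_cycled_slice_py; infer_instance

-- ===== CLAIM (what is proved, stated in full; the proofs are below) =====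
def Claim_equal_cycled_slice_py : Prop := ∀ (source : List String) (count : Int) (offset : Int), Dom_cycled_slice_py source count offset → Spec_cycled_slice_py source count offset (cycled_slice_py source count offset)

-- ===== LEMMAS AND PROOFS =====

lemma flatten_replicate_getElem? {α : Type} (xs : List α) (k i : Nat)
    (_hxs : xs ≠ []) (h : i < k * xs.length) :
    ((List.replicate k xs).flatten)[i]? = xs[i % xs.length]? := by
  induction k generalizing i with
  | zero => omega
  | succ k ih =>
    have hmul : (k + 1) * xs.length = k * xs.length + xs.length := by ring
    rw [List.replicate_succ, List.flatten_cons]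
    by_cases hi : i < xs.length
    · rw [List.getElem?_append_left hi, Nat.mod_eq_of_lt hi]
    · have h1 : xs.length ≤ i := by omega
      rw [List.getElem?_append_right h1, ih (i - xs.length) (by omega)]
      rw [Nat.mod_eq_sub_mod h1]

lemma cycled_a_eq (source : List String) (count : Int) (offset : Int)
    (hs : source ≠ []) (hc : 0 < count) :
    cycled_slice_py source count offset =
      (List.range count.toNat).map
        (fun j : Nat => PySem.List.pyGetD source (PySem.Int.mod (offset + (j : Int)) (source.length : Int)) "") := by
  unfold cycled_slice_py
  rw [if_neg (by simp [hs]; omega)]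
  rw [PySem.List.foldl_append_singleton_eq_map, PySem.List.pyRange_one, List.map_map]
  rw [show (count - 0).toNat = count.toNat by omega, List.nil_append]
  exact List.map_congr_left (fun a _ => by simp)

lemma mod_toNat_key (offset : Int) (L j : Nat) (hL : 0 < L) :
    (PySem.Int.mod (offset + (j : Int)) (L : Int)).toNat
      = ((PySem.Int.mod offset (L : Int)).toNat + j) % L := by
  have hLpos : (0:Int) < (L:Int) := by exact_mod_cast hL
  rw [PySem.Int.mod_eq_emod_of_pos hLpos, PySem.Int.mod_eq_emod_of_pos hLpos]
  have h1 : (offset + (j:Int)) % (L:Int) = ((offset % L) + j) % L := by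
    conv_lhs => rw [← Int.emod_add_mul_ediv offset (L:Int)]
    rw [show offset % (L:Int) + (L:Int) * (offset / L) + (j:Int)
          = offset % L + (j:Int) + (L:Int) * (offset / L) by ring,
        Int.add_mul_emod_self_left]
  have hsnn : 0 ≤ offset % (L:Int) := Int.emod_nonneg _ (by omega)
  rw [h1, ← Int.toNat_of_nonneg hsnn]
  have h2 : (((offset % (L:Int)).toNat : Int) + (j:Int))
      = (((offset % (L:Int)).toNat + j : Nat) : Int) := by push_cast; ring
  rw [h2, ← Int.natCast_emod, Int.toNat_natCast, Int.toNat_natCast]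

-- ===== VERDICT (by name: the statement is the Claim_ definition above) =====
theorem cycled_slice_py_spec : Claim_equal_cycled_slice_py := by
  intro source count offset _
  unfold Spec_cycled_slice_py
  by_cases hs : source = []
  · unfold cycled_slice_py cycled_slice_py_alt; simp [hs]
  · by_cases hc : count ≤ 0
    · unfold cycled_slice_py cycled_slice_py_alt; simp [hs, hc]
    · push Not at hc
      rw [cycled_a_eq source count offset hs hc]
      unfold cycled_slice_py_alt
      rw [if_neg (by simp [hs]; omega)]
      have hL : 0 < source.length := List.length_pos_iff.mpr hs
      have hLpos : (0:Int) < (source.length : Int) := by exact_mod_cast hL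
      have hmodL := PySem.Int.mod_eq_emod_of_pos (a := offset) hLpos
      have hstart_nn : 0 ≤ PySem.Int.mod offset (source.length:Int) := by
        rw [hmodL]; exact Int.emod_nonneg _ (by omega)
      have hstart_lt : PySem.Int.mod offset (source.length:Int) < (source.length:Int) := by
        rw [hmodL]; exact Int.emod_lt_of_pos _ hLpos
      rw [PySem.List.slice_toNat _ hstart_nn (by omega)]
      have htake : (PySem.Int.mod offset (source.length:Int) + count).toNat
          - (PySem.Int.mod offset (source.length:Int)).toNat = count.toNat := by omega
      rw [htake]
      -- bound on the replication factor
      have hfm := PySem.Int.floordiv_mul_add_mod count (source.length:Int)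
      have hmod_nn : 0 ≤ PySem.Int.mod count (source.length:Int) := by
        rw [PySem.Int.mod_eq_emod_of_pos hLpos]; exact Int.emod_nonneg _ (by omega)
      have hmod_lt : PySem.Int.mod count (source.length:Int) < (source.length:Int) := by
        rw [PySem.Int.mod_eq_emod_of_pos hLpos]; exact Int.emod_lt_of_pos _ hLpos
      have hf_nn : 0 ≤ PySem.Int.floordiv count (source.length:Int) := by
        rw [PySem.Int.floordiv_eq_ediv_of_pos hLpos]
        exact Int.ediv_nonneg (by omega) (by omega)
      have hkI : ((PySem.Int.floordiv count (source.length:Int) + 2).toNat : Int)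
          = PySem.Int.floordiv count (source.length:Int) + 2 := Int.toNat_of_nonneg (by omega)
      have hk2 : ((PySem.Int.floordiv count (source.length:Int) + 2).toNat : Int) * (source.length:Int)
          = PySem.Int.floordiv count (source.length:Int) * (source.length:Int) + 2 * (source.length:Int) := by
        rw [hkI]; ring
      have hbound : (PySem.Int.mod offset (source.length:Int)).toNat + count.toNat
          ≤ (PySem.Int.floordiv count (source.length:Int) + 2).toNat * source.length := by
        zify
        omega
      apply List.ext_getElem?
      intro i
      rw [List.getElem?_map, List.getElem?_take]
      by_cases hi : i < count.toNat
      · rw [if_pos hi, List.getElem?_range hi, List.getElem?_drop,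
            flatten_replicate_getElem? source _ _ hs (by omega)]
        simp only [Option.map_some]
        have hidx_nn : 0 ≤ PySem.Int.mod (offset + (i:Int)) (source.length:Int) := by
          rw [PySem.Int.mod_eq_emod_of_pos hLpos]; exact Int.emod_nonneg _ (by omega)
        have hidx_lt : PySem.Int.mod (offset + (i:Int)) (source.length:Int) < (source.length:Int) := by
          rw [PySem.Int.mod_eq_emod_of_pos hLpos]; exact Int.emod_lt_of_pos _ hLpos
        rw [PySem.List.pyGetD_eq_getElem source "" hidx_nn (by exact_mod_cast hidx_lt)]
        rw [List.getElem?_eq_getElem (by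
          have := Nat.mod_lt ((PySem.Int.mod offset (source.length:Int)).toNat + i) hL
          omega)]
        simp only [mod_toNat_key offset source.length i hL]
      · rw [if_neg hi, List.getElem?_eq_none (by simp [List.length_range]; omega)]
        simp
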